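-- pv_equiv track=rewrite | github.com/EntityProcess/agentv | examples/showcase/ks-search/mock_search_cli.py | filter_by_params
-- ===== SOURCE A (Python) =====
-- def filter_by_params(results: list[dict], filters: list[str]) -> list[dict]:
--     """Filter results based on key=value filter parameters."""
--     if not filters:
--         return results
--     filtered = results
--     for f in filters:
--         if "=" not in f:
--             continue
--         key, value = f.split("=", 1)
--         key = key.strip().lower()
--         value = value.strip().lower()
--         filtered = [r for r in filtered if r.get(key, "").lower() == value]
--     return filtered
-- ===== SOURCE B (Python) =====
-- def filter_by_params(results: list[dict], filters: list[str]) -> list[dict]: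
--     """Filter results based on key=value filter parameters."""
--     preds = []
--     for f in filters:
--         if "=" in f:
--             key, value = f.split("=", 1)
--             preds.append((key.strip().lower(), value.strip().lower()))
--     if not preds:
--         return results
--     return [r for r in results
--             if all(r.get(k, "").lower() == v for k, v in preds)]
-- ===== Notes on version B (the rewrite author's own statement) =====
-- stated objective: simpler
-- what changed: B parses all filters once into a (key,value) predicate table and filters results in a single pass with all(), instead of A's repeated re-filtering of the result list once per filter.
import Mathlib
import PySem

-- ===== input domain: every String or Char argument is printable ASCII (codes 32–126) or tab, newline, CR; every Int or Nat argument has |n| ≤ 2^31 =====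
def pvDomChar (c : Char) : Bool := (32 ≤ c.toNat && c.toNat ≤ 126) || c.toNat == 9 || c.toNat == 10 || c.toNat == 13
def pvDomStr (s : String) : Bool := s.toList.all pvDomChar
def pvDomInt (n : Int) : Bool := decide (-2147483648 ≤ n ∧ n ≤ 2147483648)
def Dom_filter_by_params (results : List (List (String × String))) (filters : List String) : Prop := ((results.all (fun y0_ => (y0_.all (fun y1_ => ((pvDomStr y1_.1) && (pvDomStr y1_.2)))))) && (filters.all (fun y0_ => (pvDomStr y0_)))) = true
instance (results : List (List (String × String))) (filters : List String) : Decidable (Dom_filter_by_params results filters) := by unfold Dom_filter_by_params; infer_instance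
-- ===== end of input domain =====

-- B parses the filters once into a predicate table and keeps results in a single pass with `all`,
-- instead of A's re-filtering of the result list once per filter (objective: simpler).


-- ===== PORT A =====
-- A's loop body: skip filters without '=', otherwise split once and re-filter `filtered`.
def pvStepA (filtered : List (List (String × String))) (f : String) : List (List (String × String)) :=
  if PySem.Str.isIn "=" f = false then filtered
  else
    match PySem.Str.splitMax? f "=" 1 with
    | some (key :: value :: _) =>
        let key := PySem.Str.lower (PySem.Str.strip key)
        let value := PySem.Str.lower (PySem.Str.strip value)
        filtered.filter (fun r =>
          PySem.Str.lower (PySem.Dict.getD (PySem.Dict.mk r) key "") == value)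
    | _ => filtered

def filter_by_params (results : List (List (String × String))) (filters : List String) : List (List (String × String)) :=
  if filters.isEmpty then results
  else filters.foldl pvStepA results

-- ===== PORT B =====
-- parse one filter string into a (key, value) predicate, none if it has no '='
def pvParseFilter (f : String) : Option (String × String) :=
  if PySem.Str.isIn "=" f then
    match PySem.Str.splitMax? f "=" 1 with
    | some (key :: value :: _) =>
        some (PySem.Str.lower (PySem.Str.strip key), PySem.Str.lower (PySem.Str.strip value))
    | _ => none
  else none

def filter_by_params_alt (results : List (List (String × String))) (filters : List String) : List (List (String × String)) :=
  let preds := filters.filterMap pvParseFilter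
  if preds.isEmpty then results
  else results.filter (fun r => preds.all (fun p =>
    PySem.Str.lower (PySem.Dict.getD (PySem.Dict.mk r) p.1 "") == p.2))

-- ===== PRECONDITION & SPEC =====
def Spec_filter_by_params (results : List (List (String × String))) (filters : List String) (out : List (List (String × String))) : Prop := out = filter_by_params_alt results filters
instance (results : List (List (String × String))) (filters : List String) (out : List (List (String × String))) : Decidable (Spec_filter_by_params results filters out) := by unfold Spec_filter_by_params; infer_instance

-- ===== CLAIM (what is proved, stated in full; the proofs are below) =====
def Claim_equal_filter_by_params : Prop := ∀ (results : List (List (String × String))) (filters : List String), Dom_filter_by_params results filters → Spec_filter_by_params results filters (filter_by_params results filters)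

-- ===== LEMMAS AND PROOFS =====

-- the per-result predicate of one parsed filter
def pvKeep (p : String × String) (r : List (String × String)) : Bool :=
  PySem.Str.lower (PySem.Dict.getD (PySem.Dict.mk r) p.1 "") == p.2

lemma pvStepA_eq_parse (filtered : List (List (String × String))) (f : String) :
    pvStepA filtered f =
      match pvParseFilter f with
      | some p => filtered.filter (pvKeep p)
      | none => filtered := by
  unfold pvStepA pvParseFilter pvKeep
  cases h : PySem.Chars.isIn ['='] f.toList with
  | false => simp [h]
  | true =>
    cases PySem.Str.splitMax? f "=" 1 with
    | none => simp [h]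
    | some l =>
      cases l with
      | nil => simp [h]
      | cons k t =>
        cases t with
        | nil => simp [h]
        | cons v t => simp [h]

lemma pvFoldA_eq_foldPreds (filters : List String)
    (rs : List (List (String × String))) :
    filters.foldl pvStepA rs =
      (filters.filterMap pvParseFilter).foldl (fun acc p => acc.filter (pvKeep p)) rs := by
  induction filters generalizing rs with
  | nil => rfl
  | cons f t ih =>
    simp only [List.foldl_cons, List.filterMap_cons, pvStepA_eq_parse]
    cases h : pvParseFilter f with
    | none => simpa using ih rs
    | some p => simpa using ih (rs.filter (pvKeep p))

lemma pvFoldPreds_eq_filter_all (preds : List (String × String))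
    (rs : List (List (String × String))) :
    preds.foldl (fun acc p => acc.filter (pvKeep p)) rs =
      rs.filter (fun r => preds.all (fun p => pvKeep p r)) := by
  induction preds generalizing rs with
  | nil => simp
  | cons p t ih =>
    simp only [List.foldl_cons, ih, List.filter_filter, List.all_cons]
    congr 1
    funext r
    rw [Bool.and_comm]

-- ===== VERDICT (by name: the statement is the Claim_ definition above) =====
theorem filter_by_params_spec : Claim_equal_filter_by_params := by
  intro results filters _
  unfold Spec_filter_by_params filter_by_params filter_by_params_alt
  by_cases hf : filters.isEmpty
  · simp only [hf, if_true]
    have : filters = [] := List.isEmpty_iff.mp hf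
    subst this
    simp
  · simp only [hf]
    rw [pvFoldA_eq_foldPreds, pvFoldPreds_eq_filter_all]
    by_cases hp : (filters.filterMap pvParseFilter).isEmpty
    · have : filters.filterMap pvParseFilter = [] := List.isEmpty_iff.mp hp
      simp [this]
    · simp only [hp]
      rfl
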